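-- pv_equiv track=rewrite | github.com/chinge55/openmm_blog | docking/core/docking.py | seperate_poses
-- ===== SOURCE A (Python) =====
-- def seperate_poses(poses:str):
--     models = []
--     current_model = []
--     for line in poses.splitlines():
--         if line.startswith("MODEL"):
--             if current_model:
--                 models.append("\n".join(current_model))
--                 current_model = []
--         current_model.append(line)
--
--     if current_model:
--         models.append("\n".join(current_model))
--
--     return models
-- ===== SOURCE B (Python) =====
-- def seperate_poses(poses: str):
--     lines = poses.splitlines()
--     models = []
--     i = 0
--     n = len(lines)
--     while i < n:
--         j = i + 1
--         while j < n and not lines[j].startswith("MODEL"):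
--             j += 1
--         models.append("\n".join(lines[i:j]))
--         i = j
--     return models
-- ===== Notes on version B (the rewrite author's own statement) =====
-- stated objective: alternative
-- what changed: Replaced A's stateful accumulate-and-flush loop (current_model list grown line by line and flushed at each MODEL line and at the end) with an index/slice segmentation: an outer loop that, for each block start i, scans forward to the next MODEL line j and emits the newline-join of lines[i:j] directly.
import Mathlib
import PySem

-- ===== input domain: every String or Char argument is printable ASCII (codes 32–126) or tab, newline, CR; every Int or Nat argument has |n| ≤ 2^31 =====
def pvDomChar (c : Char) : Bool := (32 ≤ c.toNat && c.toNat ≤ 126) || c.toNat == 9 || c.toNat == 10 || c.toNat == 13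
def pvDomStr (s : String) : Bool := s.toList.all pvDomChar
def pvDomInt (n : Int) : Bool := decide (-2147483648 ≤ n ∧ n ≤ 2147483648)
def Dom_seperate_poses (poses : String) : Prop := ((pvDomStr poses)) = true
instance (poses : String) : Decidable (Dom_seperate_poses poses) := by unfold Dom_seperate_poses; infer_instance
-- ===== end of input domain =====

-- B replaces A's accumulate-and-flush loop with index/slice segmentation (alternative decomposition, same cost).

-- ===== PORT A =====
-- the for-loop of A as structural recursion over the lines, state (models, current_model)
def pvALoop : List String → List String → List String → List String
  | [], models, current =>
    -- after the loop: if current_model: models.append("\n".join(current_model))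
    if current = [] then models else models ++ [PySem.Str.join "\n" current]
  | l :: ls, models, current =>
    if PySem.Str.startswith l "MODEL" then
      if current = [] then pvALoop ls models (current ++ [l])
      else pvALoop ls (models ++ [PySem.Str.join "\n" current]) ([] ++ [l])
    else pvALoop ls models (current ++ [l])

def seperate_poses (poses : String) : List String :=
  pvALoop (PySem.Str.splitlines poses) [] []

-- ===== PORT B =====
-- inner while loop: j advances until the next line starting with "MODEL" (indices are nonnegative, so Nat is exact)
def pvFindNext (lines : List String) (j : Nat) : Nat :=
  if h : j < lines.length then
    if PySem.Str.startswith lines[j] "MODEL" then j else pvFindNext lines (j + 1)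
  else j
termination_by lines.length - j

theorem pvFindNext_ge (lines : List String) (j : Nat) : j ≤ pvFindNext lines j := by
  fun_induction pvFindNext lines j with
  | case1 j h hM => omega
  | case2 j h hM ih => omega
  | case3 j h => omega

-- outer while loop over the block-start index i; lines[i:j] is PySem.List.slice
def pvBLoop (lines : List String) (i : Nat) : List String :=
  if h : i < lines.length then
    let j := pvFindNext lines (i + 1)
    PySem.Str.join "\n" (PySem.List.slice lines (some (i : Int)) (some (j : Int))) :: pvBLoop lines j
  else []
termination_by lines.length - i
decreasing_by have := pvFindNext_ge lines (i + 1); omega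

def seperate_poses_alt (poses : String) : List String :=
  pvBLoop (PySem.Str.splitlines poses) 0

-- ===== PRECONDITION & SPEC =====
def Spec_seperate_poses (poses : String) (out : List String) : Prop := out = seperate_poses_alt poses
instance (poses : String) (out : List String) : Decidable (Spec_seperate_poses poses out) := by unfold Spec_seperate_poses; infer_instance

-- ===== CLAIM (what is proved, stated in full; the proofs are below) =====
def Claim_equal_seperate_poses : Prop := ∀ (poses : String), Dom_seperate_poses poses → Spec_seperate_poses poses (seperate_poses poses)

-- ===== LEMMAS AND PROOFS =====

-- the predicate "line does NOT start a new block"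
def pvCont (s : String) : Bool := !(PySem.Str.startswith s "MODEL")

-- mid-level characterisation: blocks as span decomposition
def pvSpan : List String → List String
  | [] => []
  | l :: ls =>
      PySem.Str.join "\n" (l :: ls.takeWhile pvCont) :: pvSpan (ls.dropWhile pvCont)
termination_by xs => xs.length
decreasing_by simpa using Nat.lt_succ_of_le (List.length_dropWhile_le pvCont ls)

theorem pvSpan_nil : pvSpan [] = [] := by rw [pvSpan.eq_def]

theorem pvSpan_cons (l : String) (ls : List String) :
    pvSpan (l :: ls)
      = PySem.Str.join "\n" (l :: ls.takeWhile pvCont) :: pvSpan (ls.dropWhile pvCont) := by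
  rw [pvSpan]

theorem pvALoop_span (ls : List String) (models c : List String) (hc : c ≠ []) :
    pvALoop ls models c
      = models ++ (PySem.Str.join "\n" (c ++ ls.takeWhile pvCont) :: pvSpan (ls.dropWhile pvCont)) := by
  induction ls generalizing models c with
  | nil => rw [pvALoop]; simp [hc, pvSpan_nil]
  | cons l ls ih =>
    by_cases hM : PySem.Str.startswith l "MODEL"
    · have hcF : pvCont l = false := by simp only [pvCont, hM, Bool.not_true]
      rw [pvALoop, if_pos hM, if_neg hc]
      simp only [List.nil_append]
      rw [ih _ [l] (by simp)]
      simp [hcF, pvSpan_cons]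
    · have hcT : pvCont l = true := by
        simp only [pvCont, eq_false_of_ne_true hM, Bool.not_false]
      rw [pvALoop, if_neg hM, ih _ (c ++ [l]) (by simp)]
      simp [hcT]

theorem pvA_eq_span (ls : List String) : pvALoop ls [] [] = pvSpan ls := by
  cases ls with
  | nil => rw [pvALoop, pvSpan_nil]; simp
  | cons l ls =>
    have h1 : pvALoop (l :: ls) [] [] = pvALoop ls [] [l] := by
      rw [pvALoop]; by_cases hM : PySem.Str.startswith l "MODEL" <;> simp
    rw [h1, pvALoop_span ls [] [l] (by simp), pvSpan_cons]
    simp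

theorem pvFindNext_drop (lines : List String) (j : Nat) :
    pvFindNext lines j = j + ((lines.drop j).takeWhile pvCont).length ∧
    (lines.drop (pvFindNext lines j)) = (lines.drop j).dropWhile pvCont := by
  fun_induction pvFindNext lines j with
  | case1 j h hM =>
    have hd : lines.drop j = lines[j] :: lines.drop (j + 1) := List.drop_eq_getElem_cons h
    have hc : pvCont lines[j] = false := by simp only [pvCont, hM, Bool.not_true]
    rw [hd, List.takeWhile_cons, List.dropWhile_cons, hc]
    simp
  | case2 j h hM ih =>
    have hd : lines.drop j = lines[j] :: lines.drop (j + 1) := List.drop_eq_getElem_cons h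
    have hc : pvCont lines[j] = true := by
      simp only [pvCont, eq_false_of_ne_true hM, Bool.not_false]
    obtain ⟨ih1, ih2⟩ := ih
    refine ⟨?_, ?_⟩
    · rw [hd, List.takeWhile_cons, hc, ih1]; simp; omega
    · rw [hd, List.dropWhile_cons, hc]; simp [ih2]
  | case3 j h =>
    have hnil : lines.drop j = [] := List.drop_eq_nil_of_le (by omega)
    simp [hnil]

theorem pvBLoop_span_fuel (lines : List String) (k : Nat) :
    ∀ (i : Nat), lines.length - i ≤ k → pvBLoop lines i = pvSpan (lines.drop i) := by
  induction k with
  | zero =>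
    intro i hk
    have h : ¬ i < lines.length := by omega
    have hnil : lines.drop i = [] := List.drop_eq_nil_of_le (by omega)
    rw [pvBLoop.eq_def, dif_neg h, hnil, pvSpan_nil]
  | succ k ih =>
    intro i hk
    by_cases h : i < lines.length
    · obtain ⟨h1, h2⟩ := pvFindNext_drop lines (i + 1)
      have hge := pvFindNext_ge lines (i + 1)
      have hd : lines.drop i = lines[i] :: lines.drop (i + 1) := List.drop_eq_getElem_cons h
      rw [pvBLoop.eq_def, dif_pos h]
      show PySem.Str.join "\n"
            (PySem.List.slice lines (some (i : Int)) (some ((pvFindNext lines (i + 1) : Nat) : Int)))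
          :: pvBLoop lines (pvFindNext lines (i + 1)) = pvSpan (lines.drop i)
      rw [ih (pvFindNext lines (i + 1)) (by omega), h2, hd, pvSpan_cons]
      congr 2
      rw [PySem.List.slice_natCast, hd, h1]
      have ht : (i + 1 + ((lines.drop (i+1)).takeWhile pvCont).length) - i
          = ((lines.drop (i+1)).takeWhile pvCont).length + 1 := by omega
      rw [ht, List.take_succ_cons]
      congr 1
      exact (List.prefix_iff_eq_take.mp (List.takeWhile_prefix pvCont)).symm
    · have hnil : lines.drop i = [] := List.drop_eq_nil_of_le (by omega)
      rw [pvBLoop.eq_def, dif_neg h, hnil, pvSpan_nil]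

-- ===== VERDICT (by name: the statement is the Claim_ definition above) =====
theorem seperate_poses_spec : Claim_equal_seperate_poses := by
  intro poses _
  unfold Spec_seperate_poses seperate_poses seperate_poses_alt
  rw [pvA_eq_span,
      pvBLoop_span_fuel (PySem.Str.splitlines poses) (PySem.Str.splitlines poses).length 0 (by omega)]
  simp
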